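-- pv_equiv track=rewrite | github.com/ignajaja/coding-II | tarea/tarea_rec_cola.py | mayores_promedio
-- ===== SOURCE A (Python) =====
-- def promedio_lista(lis):
--     res = 0
--
--     for elem in lis:
--         res += elem
--
--     return res // len(lis)
--
-- def mayores_promedio(lis, prom = 0, r = 0):
--     if lis == []:
--         return r
--
--     if prom == 0:
--         prom = promedio_lista(lis)
--
--     if lis[0] > prom:
--         return mayores_promedio(lis[1:], prom, r + lis[0])
--     return mayores_promedio(lis[1:], prom, r)
-- ===== SOURCE B (Python) =====
-- def mayores_promedio(lis, prom=0, r=0):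
--     if not lis:
--         return r
--     if prom == 0:
--         prom = sum(lis) // len(lis)
--     return r + sum(e for e in lis if e > prom)
-- ===== Notes on version B (the rewrite author's own statement) =====
-- stated objective: simpler
-- what changed: Replaces the accumulator-passing recursion over list slices by an early return, one average computation and a single comprehension sum over the list.
-- intended difference: When prom is 0 and the floor-average of lis (and of each further suffix up to some index k) is 0 but the k-th suffix has nonzero floor-average a with a nonzero suffix element strictly between 0 and a, A silently re-derives its threshold from ever-shorter suffixes and sums with mixed thresholds, while B returns r plus the sum of elements above the whole-list floor-average, the intended reading of 'elements above the average'. — e.g. on mayores_promedio([-1, 1], 0, 0): A returns 0, B returns 1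
import Mathlib
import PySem

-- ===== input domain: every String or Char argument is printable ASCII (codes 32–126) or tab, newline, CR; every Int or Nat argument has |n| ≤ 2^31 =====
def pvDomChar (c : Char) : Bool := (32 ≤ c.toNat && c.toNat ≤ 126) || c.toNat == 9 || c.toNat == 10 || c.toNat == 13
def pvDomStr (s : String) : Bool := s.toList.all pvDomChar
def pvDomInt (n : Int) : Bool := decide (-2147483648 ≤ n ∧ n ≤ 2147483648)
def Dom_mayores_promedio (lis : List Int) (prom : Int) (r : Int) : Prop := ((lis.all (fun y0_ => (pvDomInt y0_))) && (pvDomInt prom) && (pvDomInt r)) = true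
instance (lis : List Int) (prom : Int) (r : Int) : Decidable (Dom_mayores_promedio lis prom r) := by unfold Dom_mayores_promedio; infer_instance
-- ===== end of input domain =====

-- B replaces A's slicing recursion by one average computation and one filtered sum
-- (objective: simpler); on the D_ inputs below A's suffix re-averaging makes the two differ.

-- ===== PORT A =====
def promedio_lista (lis : List Int) : Int :=
  let res := lis.foldl (fun res elem => res + elem) 0
  PySem.Int.floordiv res lis.length

def mayores_promedio (lis : List Int) (prom : Int) (r : Int) : Int :=
  match lis with
  | [] => r
  | x :: t =>
    let prom := if prom == 0 then promedio_lista (x :: t) else prom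
    if x > prom then mayores_promedio t prom (r + x) else mayores_promedio t prom r

-- ===== PORT B =====
def mayores_promedio_alt (lis : List Int) (prom : Int) (r : Int) : Int :=
  if lis = [] then r
  else
    let prom := if prom == 0 then PySem.Int.floordiv lis.sum lis.length else prom
    r + (lis.filter (fun e => e > prom)).sum

-- ===== PRECONDITION & SPEC =====
-- When prom is 0 and the floor-average of lis (and of each further suffix up to some index k)
-- is 0 but the k-th suffix has nonzero floor-average a with a nonzero suffix element strictly
-- between 0 and a, A silently re-derives its threshold from ever-shorter suffixes and sums with
-- mixed thresholds, while B returns r plus the sum of elements above the whole-list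
-- floor-average, the intended reading of 'elements above the average'.
def D_mayores_promedio (lis : List Int) (prom : Int) (r : Int) : Prop :=
  prom = 0 ∧ ∃ k ∈ Finset.Ico 1 lis.length,
    (∀ j ∈ Finset.range k,
      PySem.Int.floordiv (lis.drop j).sum ((lis.drop j).length : Int) = 0) ∧
    PySem.Int.floordiv (lis.drop k).sum ((lis.drop k).length : Int) ≠ 0 ∧
    ∃ e ∈ lis.drop k, e ≠ 0 ∧
      min (PySem.Int.floordiv (lis.drop k).sum ((lis.drop k).length : Int)) 0 < e ∧
      e ≤ max (PySem.Int.floordiv (lis.drop k).sum ((lis.drop k).length : Int)) 0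
instance (lis : List Int) (prom : Int) (r : Int) : Decidable (D_mayores_promedio lis prom r) := by
  unfold D_mayores_promedio; infer_instance

def Spec_mayores_promedio (lis : List Int) (prom : Int) (r : Int) (out : Int) : Prop :=
  ¬ D_mayores_promedio lis prom r → out = mayores_promedio_alt lis prom r
instance (lis : List Int) (prom : Int) (r : Int) (out : Int) : Decidable (Spec_mayores_promedio lis prom r out) := by unfold Spec_mayores_promedio; infer_instance

def pvDiffWitness_mayores_promedio : List Int × Int × Int := ([-1, 1], 0, 0)
def pvDiffWitnessOut_mayores_promedio : Int × Int := (0, 1)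

-- ===== CLAIM (what is proved, stated in full; the proofs are below) =====
def Claim_unchanged_mayores_promedio : Prop := ∀ (lis : List Int) (prom : Int) (r : Int), Dom_mayores_promedio lis prom r → Spec_mayores_promedio lis prom r (mayores_promedio lis prom r)
def Claim_changed_mayores_promedio : Prop := Dom_mayores_promedio (pvDiffWitness_mayores_promedio.1) (pvDiffWitness_mayores_promedio.2.1) (pvDiffWitness_mayores_promedio.2.2) ∧ D_mayores_promedio (pvDiffWitness_mayores_promedio.1) (pvDiffWitness_mayores_promedio.2.1) (pvDiffWitness_mayores_promedio.2.2) ∧ mayores_promedio (pvDiffWitness_mayores_promedio.1) (pvDiffWitness_mayores_promedio.2.1) (pvDiffWitness_mayores_promedio.2.2) = pvDiffWitnessOut_mayores_promedio.1 ∧ mayores_promedio_alt (pvDiffWitness_mayores_promedio.1) (pvDiffWitness_mayores_promedio.2.1) (pvDiffWitness_mayores_promedio.2.2) = pvDiffWitnessOut_mayores_promedio.2 ∧ pvDiffWitnessOut_mayores_promedio.1 ≠ pvDiffWitnessOut_mayores_promedio.2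

def Claim_exact_mayores_promedio : Prop := ∀ (lis : List Int) (prom : Int) (r : Int), Dom_mayores_promedio lis prom r → D_mayores_promedio lis prom r → mayores_promedio lis prom r ≠ mayores_promedio_alt lis prom r

-- ===== LEMMAS AND PROOFS =====

-- promedio_lista computes the floor-average
theorem pv_prom_eq (lis : List Int) :
    promedio_lista lis = PySem.Int.floordiv lis.sum lis.length := by
  have h : ∀ (a : Int), lis.foldl (fun u v => u + v) a = a + lis.sum := by
    induction lis with
    | nil => simp
    | cons x t ih => intro a; simp [List.foldl, ih, List.sum_cons]; ring
  simp [promedio_lista, h]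

-- with a nonzero threshold A is plain filtered summation
theorem pv_nonzero (t : List Int) (p r : Int) (hp : p ≠ 0) :
    mayores_promedio t p r = r + (t.filter (fun e => e > p)).sum := by
  induction t generalizing r with
  | nil => simp [mayores_promedio]
  | cons x u ih =>
    simp only [mayores_promedio, beq_iff_eq, if_neg hp]
    by_cases hx : x > p
    · simp [hx, ih, List.filter_cons]; ring
    · simp [hx, ih, List.filter_cons]

-- band-empty lists sum the same above a and above 0
theorem pv_band (t : List Int) (a : Int)
    (hb : ∀ e ∈ t, ¬(e ≠ 0 ∧ min a 0 < e ∧ e ≤ max a 0)) :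
    (t.filter (fun e => e > a)).sum = (t.filter (fun e => e > 0)).sum := by
  induction t with
  | nil => simp
  | cons x u ih =>
    have hx := hb x (by simp)
    have hmin : min a 0 = a ∨ min a 0 = 0 := min_choice a 0
    have hmax : max a 0 = a ∨ max a 0 = 0 := max_choice a 0
    have hminle : min a 0 ≤ a ∧ min a 0 ≤ 0 := ⟨min_le_left a 0, min_le_right a 0⟩
    have hmaxge : a ≤ max a 0 ∧ (0:Int) ≤ max a 0 := ⟨le_max_left a 0, le_max_right a 0⟩
    have ih' := ih (fun e he => hb e (by simp [he]))
    by_cases h1 : x > a <;> by_cases h2 : x > 0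
    · rw [List.filter_cons, List.filter_cons, if_pos (by simpa using h1),
        if_pos (by simpa using h2)]
      simp [ih']
    · -- x > a, x ≤ 0: then a < 0 and hx forces x = 0
      have hx0 : x = 0 := by
        by_contra hne
        exact hx ⟨hne, by rcases hmin with h | h <;> omega,
          by rcases hmax with h | h <;> omega⟩
      rw [List.filter_cons, List.filter_cons, if_pos (by simpa using h1),
        if_neg (by simpa using h2)]
      simp [hx0, ih']
    · -- x ≤ a, x > 0: then 0 < x ≤ a, contradiction with hx
      exact absurd ⟨by omega, by rcases hmin with h | h <;> omega,
        by rcases hmax with h | h <;> omega⟩ hx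
    · rw [List.filter_cons, List.filter_cons, if_neg (by simpa using h1),
        if_neg (by simpa using h2)]
      exact ih'

-- D is monotone upwards through a zero-average cons
theorem pv_D_mono (x : Int) (t : List Int) (r r' : Int)
    (h0 : PySem.Int.floordiv (x :: t).sum ((x :: t).length : Int) = 0)
    (hD : D_mayores_promedio t 0 r') : D_mayores_promedio (x :: t) 0 r := by
  obtain ⟨-, k, hk, hz, ha, e, he, hband⟩ := hD
  simp only [Finset.mem_Ico] at hk
  refine ⟨rfl, k + 1, by simp [Finset.mem_Ico]; omega, ?_, ?_, e, ?_, hband⟩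
  · intro j hj
    simp only [Finset.mem_range] at hj
    cases j with
    | zero => simpa using h0
    | succ j' => exact hz j' (by simp; omega)
  · simpa using ha
  · simpa using he

-- B unfolded on the two shapes it distinguishes
theorem pv_alt_nil (p r : Int) : mayores_promedio_alt [] p r = r := by
  simp [mayores_promedio_alt]

theorem pv_alt_zero (y : Int) (u : List Int) (r : Int) :
    mayores_promedio_alt (y :: u) 0 r
    = r + ((y :: u).filter
        (fun e => e > PySem.Int.floordiv (y :: u).sum ((y :: u).length : Int))).sum := by
  simp [mayores_promedio_alt]

-- one zero-average step of A
theorem pv_A_step (x : Int) (t : List Int) (r : Int)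
    (h0 : PySem.Int.floordiv (x :: t).sum ((x :: t).length : Int) = 0) :
    mayores_promedio (x :: t) 0 r
      = mayores_promedio t 0 (if x > 0 then r + x else r) := by
  simp only [mayores_promedio, beq_self_eq_true, if_true, pv_prom_eq, h0]
  by_cases hx : x > 0 <;> simp [hx]

-- A skips past a block of zero-average suffixes, summing positives
theorem pv_A_skip (k : Nat) (lis : List Int) (r : Int) (hk : k ≤ lis.length)
    (hz : ∀ j ∈ Finset.range k,
      PySem.Int.floordiv (lis.drop j).sum ((lis.drop j).length : Int) = 0) :
    mayores_promedio lis 0 r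
      = mayores_promedio (lis.drop k) 0
          (r + ((lis.take k).filter (fun e => e > 0)).sum) := by
  induction k generalizing lis r with
  | zero => simp
  | succ k ih =>
    cases lis with
    | nil => simp at hk
    | cons x t =>
      have h0 := hz 0 (by simp)
      rw [pv_A_step x t r (by simpa using h0)]
      rw [ih t _ (by simpa using hk)
        (fun j hj => by simpa using hz (j + 1) (by simp at hj ⊢; omega))]
      simp only [List.drop_succ_cons, List.take_succ_cons, List.filter_cons]
      by_cases hx : x > 0
      · rw [if_pos hx, if_pos (by simpa using hx)]; simp; ring_nf
      · rw [if_neg hx, if_neg (by simpa using hx)]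

-- A with a nonzero whole-list average is plain filtered summation over that average
theorem pv_A_nonzeroavg (x : Int) (t : List Int) (r : Int)
    (h0 : PySem.Int.floordiv (x :: t).sum ((x :: t).length : Int) ≠ 0) :
    mayores_promedio (x :: t) 0 r
      = r + ((x :: t).filter
          (fun e => e > PySem.Int.floordiv (x :: t).sum ((x :: t).length : Int))).sum := by
  set a0 := PySem.Int.floordiv (x :: t).sum ((x :: t).length : Int) with ha0
  simp only [mayores_promedio, beq_self_eq_true, if_true, pv_prom_eq, ← ha0]
  by_cases hx : x > a0
  · rw [if_pos hx, pv_nonzero t a0 _ h0, List.filter_cons, if_pos (by simpa using hx)]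
    simp; ring
  · rw [if_neg hx, pv_nonzero t a0 _ h0, List.filter_cons, if_neg (by simpa using hx)]

-- splitting a filtered sum at a positive threshold
theorem pv_split_pos (t : List Int) (a : Int) (ha : 0 < a) :
    (t.filter (fun e => e > 0)).sum
      = (t.filter (fun e => e > a)).sum
        + (t.filter (fun e => 0 < e ∧ e ≤ a)).sum := by
  induction t with
  | nil => simp
  | cons x u ih =>
    simp only [List.filter_cons]
    by_cases h1 : x > a
    · rw [if_pos (by simp; omega), if_pos (by simpa using h1), if_neg (by simp; omega)]
      simp [ih]; ring
    · by_cases h2 : x > 0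
      · rw [if_pos (by simpa using h2), if_neg (by simpa using h1), if_pos (by simp; omega)]
        simp [ih]; ring
      · rw [if_neg (by simpa using h2), if_neg (by simp; omega), if_neg (by simp; omega)]
        exact ih

-- splitting a filtered sum at a negative threshold
theorem pv_split_neg (t : List Int) (a : Int) (ha : a < 0) :
    (t.filter (fun e => e > a)).sum
      = (t.filter (fun e => e > 0)).sum
        + (t.filter (fun e => a < e ∧ e ≤ 0)).sum := by
  induction t with
  | nil => simp
  | cons x u ih =>
    simp only [List.filter_cons]
    by_cases h1 : x > 0
    · rw [if_pos (by simp; omega), if_pos (by simpa using h1), if_neg (by simp; omega)]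
      simp [ih]; ring
    · by_cases h2 : x > a
      · rw [if_pos (by simpa using h2), if_neg (by simpa using h1), if_pos (by simp; omega)]
        simp [ih]; ring
      · rw [if_neg (by simp; omega), if_neg (by simpa using h1), if_neg (by simp; omega)]
        exact ih

-- sums of signed lists
theorem pv_sum_nonpos (l : List Int) (h : ∀ x ∈ l, x ≤ 0) : l.sum ≤ 0 := by
  induction l with
  | nil => simp
  | cons x u ih =>
    have := ih (fun y hy => h y (by simp [hy]))
    have hx := h x (by simp)
    simp [List.sum_cons]; omega

theorem pv_sum_neg (l : List Int) (h : ∀ x ∈ l, x ≤ 0)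
    (e : Int) (he : e ∈ l) (hen : e < 0) : l.sum < 0 := by
  induction l with
  | nil => simp at he
  | cons x u ih =>
    have hx := h x (by simp)
    rcases List.mem_cons.mp he with rfl | he'
    · have := pv_sum_nonpos u (fun y hy => h y (by simp [hy]))
      simp [List.sum_cons]; omega
    · have := ih (fun y hy => h y (by simp [hy])) he'
      simp [List.sum_cons]; omega

theorem pv_sum_nonneg (l : List Int) (h : ∀ x ∈ l, 0 ≤ x) : 0 ≤ l.sum := by
  induction l with
  | nil => simp
  | cons x u ih =>
    have := ih (fun y hy => h y (by simp [hy]))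
    have hx := h x (by simp)
    simp [List.sum_cons]; omega

theorem pv_sum_pos (l : List Int) (h : ∀ x ∈ l, 0 < x) (hne : l ≠ []) : 0 < l.sum := by
  cases l with
  | nil => simp at hne
  | cons x u =>
    have h1 := pv_sum_nonneg u (fun y hy => le_of_lt (h y (by simp [hy])))
    have hx := h x (by simp)
    simp [List.sum_cons]; omega

-- a band witness makes the two filtered sums differ
theorem pv_band_ne (t : List Int) (a : Int) (ha : a ≠ 0)
    (e : Int) (he : e ∈ t) (he0 : e ≠ 0) (hlo : min a 0 < e) (hhi : e ≤ max a 0) :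
    (t.filter (fun e => e > a)).sum ≠ (t.filter (fun e => e > 0)).sum := by
  rcases lt_or_gt_of_ne ha with haneg | hapos
  · -- a < 0: extra band (a,0], its nonzero elements are negative
    have hmin : min a 0 = a := min_eq_left (le_of_lt haneg)
    have hmax : max a 0 = 0 := max_eq_right (le_of_lt haneg)
    rw [hmin] at hlo; rw [hmax] at hhi
    have hband : (t.filter (fun e => a < e ∧ e ≤ 0)).sum < 0 := by
      refine pv_sum_neg _ (fun x hx => ?_) e (List.mem_filter.mpr ⟨he, ?_⟩) (by omega)
      · simp only [List.mem_filter, decide_eq_true_eq] at hx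
        exact hx.2.2
      · simp only [decide_eq_true_eq]
        exact ⟨hlo, hhi⟩
    rw [pv_split_neg t a haneg]
    omega
  · -- a > 0: extra band (0,a], all its elements positive
    have hmin : min a 0 = 0 := min_eq_right (le_of_lt hapos)
    have hmax : max a 0 = a := max_eq_left (le_of_lt hapos)
    rw [hmin] at hlo; rw [hmax] at hhi
    have hband : 0 < (t.filter (fun e => 0 < e ∧ e ≤ a)).sum := by
      apply pv_sum_pos
      · intro x hx
        simp only [List.mem_filter, decide_eq_true_eq] at hx
        exact hx.2.1
      · intro hnil
        have hmem : e ∈ t.filter (fun e => 0 < e ∧ e ≤ a) :=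
          List.mem_filter.mpr ⟨he, by simp only [decide_eq_true_eq]; exact ⟨hlo, hhi⟩⟩
        rw [hnil] at hmem; simp at hmem
    rw [pv_split_pos t a hapos]
    omega

-- main agreement lemma for prom = 0
theorem pv_main (lis : List Int) (r : Int) (hD : ¬ D_mayores_promedio lis 0 r) :
    mayores_promedio lis 0 r = mayores_promedio_alt lis 0 r := by
  induction lis generalizing r with
  | nil => simp [mayores_promedio, pv_alt_nil]
  | cons x t ih =>
    set a0 := PySem.Int.floordiv (x :: t).sum ((x :: t).length : Int) with ha0
    by_cases h0 : a0 = 0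
    · -- whole-list average is zero: A recurses with prom = 0, B's threshold is 0
      have hA : mayores_promedio (x :: t) 0 r
          = mayores_promedio t 0 (if x > 0 then r + x else r) := by
        simp only [mayores_promedio, beq_self_eq_true, if_true, pv_prom_eq, ← ha0, h0]
        by_cases hx : x > 0 <;> simp [hx]
      set r' := if x > 0 then r + x else r with hr'
      have hDt : ¬ D_mayores_promedio t 0 r' :=
        fun h => hD (pv_D_mono x t r r' (by rw [← ha0]; exact h0) h)
      rw [hA, ih r' hDt]
      cases t with
      | nil =>
        rw [pv_alt_nil, pv_alt_zero, ← ha0, h0]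
        by_cases hx : x > 0 <;> simp [List.filter_cons, hr', hx]
      | cons y u =>
        set a1 := PySem.Int.floordiv (y :: u).sum ((y :: u).length : Int) with ha1
        have hband : ((y :: u).filter (fun e => e > a1)).sum
            = ((y :: u).filter (fun e => e > 0)).sum := by
          by_cases h1 : a1 = 0
          · simp [h1]
          · apply pv_band
            intro e he hcon
            refine hD ⟨rfl, 1, by simp [Finset.mem_Ico], ?_, h1, e, he,
              hcon.1, hcon.2.1, hcon.2.2⟩
            intro j hj
            simp only [Finset.mem_range, Nat.lt_one_iff] at hj
            subst hj
            exact h0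
        rw [pv_alt_zero, ← ha1, hband, pv_alt_zero, ← ha0, h0]
        by_cases hx : x > 0 <;> simp [List.filter_cons, hr', hx] <;> ring
    · -- nonzero whole-list average: both use it as the fixed threshold
      have hA : mayores_promedio (x :: t) 0 r
          = r + ((x :: t).filter (fun e => e > a0)).sum := by
        simp only [mayores_promedio, beq_self_eq_true, if_true, pv_prom_eq, ← ha0]
        by_cases hx : x > a0
        · rw [if_pos hx, pv_nonzero t a0 _ h0, List.filter_cons, if_pos (by simpa using hx)]
          simp; ring
        · rw [if_neg hx, pv_nonzero t a0 _ h0, List.filter_cons, if_neg (by simpa using hx)]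
      rw [hA, pv_alt_zero, ← ha0]

-- ===== VERDICT (by name: the statement is the Claim_ definition above) =====
theorem mayores_promedio_spec : Claim_unchanged_mayores_promedio := by
  intro lis prom r _ hD
  by_cases hp : prom = 0
  · subst hp; exact pv_main lis r hD
  · rw [pv_nonzero lis prom r hp]
    cases lis with
    | nil => simp [mayores_promedio_alt]
    | cons x t => simp [mayores_promedio_alt, hp]

theorem mayores_promedio_changed : Claim_changed_mayores_promedio := by
  unfold Claim_changed_mayores_promedio; decide

theorem mayores_promedio_tight : Claim_exact_mayores_promedio := by
  intro lis prom r _ hD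
  obtain ⟨hp, k, hk, hz, ha, e, he, he0, hlo, hhi⟩ := hD
  subst hp
  simp only [Finset.mem_Ico] at hk
  obtain ⟨z, w, rfl⟩ : ∃ z w, lis = z :: w := by
    cases lis with
    | nil => simp at hk
    | cons z w => exact ⟨z, w, rfl⟩
  rw [pv_A_skip k (z :: w) r (le_of_lt hk.2) hz]
  obtain ⟨y, u, hyu⟩ : ∃ y u, (z :: w).drop k = y :: u := by
    cases hdrop : (z :: w).drop k with
    | nil => exfalso; have := List.drop_eq_nil_iff.mp hdrop; omega
    | cons y u => exact ⟨y, u, rfl⟩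
  rw [hyu, pv_A_nonzeroavg y u _ (by rw [← hyu]; exact ha)]
  rw [pv_alt_zero]
  rw [show PySem.Int.floordiv (z :: w).sum (((z :: w).length : Nat) : Int) = 0 from by
    have h := hz 0 (by simp [Finset.mem_range]; omega)
    rw [List.drop_zero] at h; exact h]
  have hsplit : ((z :: w).filter (fun e => e > 0)).sum
      = (((z :: w).take k).filter (fun e => e > 0)).sum
        + (((z :: w).drop k).filter (fun e => e > 0)).sum := by
    conv_lhs => rw [← List.take_append_drop k (z :: w)]
    rw [List.filter_append, List.sum_append]
  rw [hsplit, hyu]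
  rw [hyu] at ha he hlo hhi
  have hne := pv_band_ne (y :: u) _ ha e he he0 hlo hhi
  intro hcon
  apply hne
  omega
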